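-- pv_equiv track=rewrite | github.com/pinus/HenParser | Gengo.py | seireki_to_wareki
-- ===== SOURCE A (Python) =====
-- GENGO_DATA = "明治,M,18681023,大正,T,19120730,昭和,S,19261225,平成,H,19890108,令和,R,20190501"
--
-- def seireki_to_wareki(date, format_type=1):
--
--     eras = GENGO_DATA.split(',')
--
--     date_int = int(date)
--
--     for i in range(len(eras) - 1, 1, -3):
--         era_start = int(eras[i])
--
--         if date_int >= era_start:
--             era_name = eras[i - 2] if format_type == 1 else eras[i - 1]
--
--             # 年号を計算
--             year = date_int // 10000 - era_start // 10000 + 1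
--             year_str = str(year)
--
--             # 元年の場合、年号を "元年" にする
--             if year == 1:
--                 year_str = "元年"
--             else:
--                 year_str += "年"  # 年号の後ろに "年" を追加
--
--             # 月日部分をフォーマット
--             month_day = date[4:6].lstrip("0") + "月" + date[6:].lstrip("0") + "日" if format_type == 1 else date[4:]
--
--             if format_type == 2:
--                 # format_type が 2 の場合、年を2桁ゼロ埋め
--                 year_str = str(year).zfill(2)
--
--             return era_name + year_str + month_day
--
--     return "元号情報を登録してください。"
-- ===== SOURCE B (Python) =====
-- GENGO_DATA = "明治,M,18681023,大正,T,19120730,昭和,S,19261225,平成,H,19890108,令和,R,20190501"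
--
-- _fields = GENGO_DATA.split(',')
-- NAMES = _fields[0::3]
-- ABBRS = _fields[1::3]
-- STARTS = [int(s) for s in _fields[2::3]]
--
--
-- def seireki_to_wareki(date, format_type=1):
--     date_int = int(date)
--
--     # binary search: lo becomes the number of era starts <= date_int
--     lo, hi = 0, len(STARTS)
--     while lo < hi:
--         mid = (lo + hi) // 2
--         if STARTS[mid] <= date_int:
--             lo = mid + 1
--         else:
--             hi = mid
--
--     if lo == 0:
--         return "元号情報を登録してください。"
--
--     start = STARTS[lo - 1]
--     year = date_int // 10000 - start // 10000 + 1
--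
--     if format_type == 2:
--         return ABBRS[lo - 1] + str(year).zfill(2) + date[4:]
--
--     year_str = "元年" if year == 1 else str(year) + "年"
--     if format_type == 1:
--         return (NAMES[lo - 1] + year_str + date[4:6].lstrip("0") + "月"
--                 + date[6:].lstrip("0") + "日")
--     return ABBRS[lo - 1] + year_str + date[4:]
-- ===== Notes on version B (the rewrite author's own statement) =====
-- stated objective: alternative
-- what changed: B pre-splits the era table into three parallel lists (names, abbrs, integer starts taken by stride-3 slices) and locates the applicable era by BINARY SEARCH for the rightmost start <= int(date), instead of A's reverse step -3 linear index scan with early return; formatting is restructured into one branch per format_type.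
import Mathlib
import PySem

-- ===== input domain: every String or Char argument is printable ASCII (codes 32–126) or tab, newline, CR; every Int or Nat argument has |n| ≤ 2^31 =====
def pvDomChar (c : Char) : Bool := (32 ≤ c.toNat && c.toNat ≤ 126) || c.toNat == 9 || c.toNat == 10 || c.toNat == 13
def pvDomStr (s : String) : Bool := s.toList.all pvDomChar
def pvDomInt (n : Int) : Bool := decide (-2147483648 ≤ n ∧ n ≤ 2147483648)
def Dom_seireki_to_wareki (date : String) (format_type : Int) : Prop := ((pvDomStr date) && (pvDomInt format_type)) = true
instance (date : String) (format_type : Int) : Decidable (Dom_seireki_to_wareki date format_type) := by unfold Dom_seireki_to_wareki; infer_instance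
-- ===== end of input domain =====

-- B pre-splits the era table into parallel name/abbr/start lists (stride-3 slices) and finds the
-- applicable era by binary search for the rightmost start ≤ int(date), instead of A's reverse
-- step -3 linear index scan (objective: alternative algorithm).

def gengoData : String := "明治,M,18681023,大正,T,19120730,昭和,S,19261225,平成,H,19890108,令和,R,20190501"

-- exact hand port of Python's s.lstrip("0"): drop the leading '0' characters
def lstripZeros (s : String) : String := String.ofList (s.toList.dropWhile (· == '0'))

-- ===== PORT A =====
-- the loop body of A; early 'return' becomes the recursion's result.  eras[i] and int(eras[i])
-- act on the constant table and cannot fail; .getD covers the unreachable none branch.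
def swLoopA (eras : List String) (date : String) (date_int format_type : Int) : List Int → String
  | [] => "元号情報を登録してください。"
  | i :: rest =>
    let era_start := (PySem.Int.ofStr? ((PySem.List.pyGet? eras i).getD "")).getD 0
    if date_int ≥ era_start then
      let era_name := if format_type = 1 then (PySem.List.pyGet? eras (i - 2)).getD ""
                      else (PySem.List.pyGet? eras (i - 1)).getD ""
      let year := PySem.Int.floordiv date_int 10000 - PySem.Int.floordiv era_start 10000 + 1
      let year_str := PySem.Int.toStr year
      let year_str := if year = 1 then "元年" else year_str ++ "年"
      let month_day := if format_type = 1 then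
          lstripZeros (PySem.Str.slice date (some 4) (some 6)) ++ "月"
            ++ lstripZeros (PySem.Str.slice date (some 6) none) ++ "日"
        else PySem.Str.slice date (some 4) none
      let year_str := if format_type = 2 then PySem.Str.zfill (PySem.Int.toStr year) 2 else year_str
      era_name ++ year_str ++ month_day
    else swLoopA eras date date_int format_type rest

def seireki_to_wareki (date : String) (format_type : Int) : String :=
  let eras := (PySem.Str.split? gengoData ",").getD []
  match PySem.Int.ofStr? date with
  | none => ""   -- int(date) raises ValueError here; excluded by Pre_
  | some date_int =>
      swLoopA eras date date_int format_type (PySem.List.pyRange ((eras.length : Int) - 1) 1 (-3))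

-- ===== PORT B =====
-- the module-level constants of Source B: fields split once, stride-3 slices
def bFields : List String := (PySem.Str.split? gengoData ",").getD []
def bNames : List String := (PySem.List.slice? bFields (some 0) none 3).getD []
def bAbbrs : List String := (PySem.List.slice? bFields (some 1) none 3).getD []
def bStarts : List Int := ((PySem.List.slice? bFields (some 2) none 3).getD []).map
  (fun s => (PySem.Int.ofStr? s).getD 0)

-- the while loop of B's binary search; fuel only makes the loop total (it never runs out)
def bsCount (x : Int) : Nat → Nat → Nat → Nat
  | 0, lo, _ => lo
  | fuel + 1, lo, hi =>
    if lo < hi then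
      let mid := (lo + hi) / 2
      if ((bStarts[mid]?).getD 0) ≤ x then bsCount x fuel (mid + 1) hi
      else bsCount x fuel lo mid
    else lo

def seireki_to_wareki_alt (date : String) (format_type : Int) : String :=
  match PySem.Int.ofStr? date with
  | none => ""   -- int(date) raises ValueError here; excluded by Pre_
  | some date_int =>
    let lo := bsCount date_int (bStarts.length + 1) 0 bStarts.length
    if lo = 0 then "元号情報を登録してください。"
    else
      let start := (bStarts[lo - 1]?).getD 0
      let year := PySem.Int.floordiv date_int 10000 - PySem.Int.floordiv start 10000 + 1
      if format_type = 2 then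
        ((bAbbrs[lo - 1]?).getD "") ++ PySem.Str.zfill (PySem.Int.toStr year) 2
          ++ PySem.Str.slice date (some 4) none
      else
        let year_str := if year = 1 then "元年" else PySem.Int.toStr year ++ "年"
        if format_type = 1 then
          ((bNames[lo - 1]?).getD "") ++ year_str
            ++ lstripZeros (PySem.Str.slice date (some 4) (some 6)) ++ "月"
            ++ lstripZeros (PySem.Str.slice date (some 6) none) ++ "日"
        else
          ((bAbbrs[lo - 1]?).getD "") ++ year_str ++ PySem.Str.slice date (some 4) none

-- ===== PRECONDITION & SPEC =====
-- Pre_ excludes exactly the strings on which int(date) raises ValueError in both programs.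
def Pre_seireki_to_wareki (date : String) (format_type : Int) : Prop :=
  (PySem.Int.ofStr? date).isSome
instance (date : String) (format_type : Int) : Decidable (Pre_seireki_to_wareki date format_type) := by
  unfold Pre_seireki_to_wareki; infer_instance

def pvWitness_seireki_to_wareki : String × Int := ("20190501", 1)

def Spec_seireki_to_wareki (date : String) (format_type : Int) (out : String) : Prop := out = seireki_to_wareki_alt date format_type
instance (date : String) (format_type : Int) (out : String) : Decidable (Spec_seireki_to_wareki date format_type out) := by unfold Spec_seireki_to_wareki; infer_instance

-- ===== CLAIM (what is proved, stated in full; the proofs are below) =====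
def Claim_equal_seireki_to_wareki : Prop := ∀ (date : String) (format_type : Int), Dom_seireki_to_wareki date format_type → Pre_seireki_to_wareki date format_type → Spec_seireki_to_wareki date format_type (seireki_to_wareki date format_type)

-- ===== LEMMAS AND PROOFS =====

theorem erasList_eq : (PySem.Str.split? gengoData ",").getD [] =
    ["明治", "M", "18681023", "大正", "T", "19120730", "昭和", "S", "19261225", "平成", "H", "19890108", "令和", "R", "20190501"] := by decide

theorem rangeA_eq : PySem.List.pyRange ((15 : Int) - 1) 1 (-3) = [14, 11, 8, 5, 2] := by decide

theorem bStarts_eq : bStarts = [18681023, 19120730, 19261225, 19890108, 20190501] := by decide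
theorem bNames_eq : bNames = ["明治", "大正", "昭和", "平成", "令和"] := by decide
theorem bAbbrs_eq : bAbbrs = ["M", "T", "S", "H", "R"] := by decide

-- closed form of B's binary search on the 5-entry table
theorem bsCount_eq (x : Int) : bsCount x 6 0 5 =
    (if 20190501 ≤ x then 5 else if 19890108 ≤ x then 4 else if 19261225 ≤ x then 3
     else if 19120730 ≤ x then 2 else if 18681023 ≤ x then 1 else 0) := by
  norm_num [bsCount, bStarts_eq]
  split_ifs <;> omega

theorem pvStart_14 : (PySem.Int.ofStr? ((PySem.List.pyGet? ["明治", "M", "18681023", "大正", "T", "19120730", "昭和", "S", "19261225", "平成", "H", "19890108", "令和", "R", "20190501"] (14 : Int)).getD "")).getD 0 = 20190501 := by decide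
theorem pvName_14 : (PySem.List.pyGet? ["明治", "M", "18681023", "大正", "T", "19120730", "昭和", "S", "19261225", "平成", "H", "19890108", "令和", "R", "20190501"] ((14 : Int) - 2)).getD "" = "令和" := by decide
theorem pvAbbr_14 : (PySem.List.pyGet? ["明治", "M", "18681023", "大正", "T", "19120730", "昭和", "S", "19261225", "平成", "H", "19890108", "令和", "R", "20190501"] ((14 : Int) - 1)).getD "" = "R" := by decide
theorem pvStart_11 : (PySem.Int.ofStr? ((PySem.List.pyGet? ["明治", "M", "18681023", "大正", "T", "19120730", "昭和", "S", "19261225", "平成", "H", "19890108", "令和", "R", "20190501"] (11 : Int)).getD "")).getD 0 = 19890108 := by decide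
theorem pvName_11 : (PySem.List.pyGet? ["明治", "M", "18681023", "大正", "T", "19120730", "昭和", "S", "19261225", "平成", "H", "19890108", "令和", "R", "20190501"] ((11 : Int) - 2)).getD "" = "平成" := by decide
theorem pvAbbr_11 : (PySem.List.pyGet? ["明治", "M", "18681023", "大正", "T", "19120730", "昭和", "S", "19261225", "平成", "H", "19890108", "令和", "R", "20190501"] ((11 : Int) - 1)).getD "" = "H" := by decide
theorem pvStart_8 : (PySem.Int.ofStr? ((PySem.List.pyGet? ["明治", "M", "18681023", "大正", "T", "19120730", "昭和", "S", "19261225", "平成", "H", "19890108", "令和", "R", "20190501"] (8 : Int)).getD "")).getD 0 = 19261225 := by decide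
theorem pvName_8 : (PySem.List.pyGet? ["明治", "M", "18681023", "大正", "T", "19120730", "昭和", "S", "19261225", "平成", "H", "19890108", "令和", "R", "20190501"] ((8 : Int) - 2)).getD "" = "昭和" := by decide
theorem pvAbbr_8 : (PySem.List.pyGet? ["明治", "M", "18681023", "大正", "T", "19120730", "昭和", "S", "19261225", "平成", "H", "19890108", "令和", "R", "20190501"] ((8 : Int) - 1)).getD "" = "S" := by decide
theorem pvStart_5 : (PySem.Int.ofStr? ((PySem.List.pyGet? ["明治", "M", "18681023", "大正", "T", "19120730", "昭和", "S", "19261225", "平成", "H", "19890108", "令和", "R", "20190501"] (5 : Int)).getD "")).getD 0 = 19120730 := by decide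
theorem pvName_5 : (PySem.List.pyGet? ["明治", "M", "18681023", "大正", "T", "19120730", "昭和", "S", "19261225", "平成", "H", "19890108", "令和", "R", "20190501"] ((5 : Int) - 2)).getD "" = "大正" := by decide
theorem pvAbbr_5 : (PySem.List.pyGet? ["明治", "M", "18681023", "大正", "T", "19120730", "昭和", "S", "19261225", "平成", "H", "19890108", "令和", "R", "20190501"] ((5 : Int) - 1)).getD "" = "T" := by decide
theorem pvStart_2 : (PySem.Int.ofStr? ((PySem.List.pyGet? ["明治", "M", "18681023", "大正", "T", "19120730", "昭和", "S", "19261225", "平成", "H", "19890108", "令和", "R", "20190501"] (2 : Int)).getD "")).getD 0 = 18681023 := by decide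
theorem pvName_2 : (PySem.List.pyGet? ["明治", "M", "18681023", "大正", "T", "19120730", "昭和", "S", "19261225", "平成", "H", "19890108", "令和", "R", "20190501"] ((2 : Int) - 2)).getD "" = "明治" := by decide
theorem pvAbbr_2 : (PySem.List.pyGet? ["明治", "M", "18681023", "大正", "T", "19120730", "昭和", "S", "19261225", "平成", "H", "19890108", "令和", "R", "20190501"] ((2 : Int) - 1)).getD "" = "M" := by decide


set_option maxHeartbeats 4000000 in
theorem seireki_to_wareki_eq (date : String) (format_type : Int)
    (h : (PySem.Int.ofStr? date).isSome) :
    seireki_to_wareki date format_type = seireki_to_wareki_alt date format_type := by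
  obtain ⟨n, hn⟩ := Option.isSome_iff_exists.mp h
  unfold seireki_to_wareki seireki_to_wareki_alt
  rw [erasList_eq, hn]
  simp only [List.length_cons, List.length_nil]
  rw [show ((15 : Nat) : Int) = 15 from rfl]
  rw [rangeA_eq]
  simp only [swLoopA]
  rw [show bStarts.length + 1 = 6 from by rw [bStarts_eq]; rfl,
      show bStarts.length = 5 from by rw [bStarts_eq]; rfl]
  rw [bsCount_eq, bStarts_eq, bNames_eq, bAbbrs_eq]
  simp only [pvStart_14, pvName_14, pvAbbr_14, pvStart_11, pvName_11, pvAbbr_11, pvStart_8,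
    pvName_8, pvAbbr_8, pvStart_5, pvName_5, pvAbbr_5, pvStart_2, pvName_2, pvAbbr_2, ge_iff_le]
  by_cases c5 : (20190501 : Int) ≤ n <;> by_cases c4 : (19890108 : Int) ≤ n <;>
    by_cases c3 : (19261225 : Int) ≤ n <;> by_cases c2 : (19120730 : Int) ≤ n <;>
    by_cases c1 : (18681023 : Int) ≤ n <;>
    first
      | omega
      | (simp only [c5, c4, c3, c2, c1, if_true, if_false] <;> norm_num <;>
          first
            | rfl
            | (by_cases h2 : format_type = 2 <;> by_cases h1 : format_type = 1 <;>
                 first | omega | simp [h1, h2, String.append_assoc]))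
-- ===== VERDICT (by name: the statement is the Claim_ definition above) =====
theorem seireki_to_wareki_spec : Claim_equal_seireki_to_wareki := by
  intro date format_type _ hpre
  unfold Spec_seireki_to_wareki
  exact seireki_to_wareki_eq date format_type hpre
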